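-- pv_equiv track=rewrite | github.com/kleur/adventofcode | 2020/2/day2.py | is_valid_pt1
-- ===== SOURCE A (Python) =====
-- def is_valid_pt1(min_occ, max_occ, glyph, password):
--     if len(password) == 0:
--         return min_occ <= 0 <= max_occ
--
--     if max_occ < 0:
--         return False
--
--     cur = password[0]
--     if cur == glyph:
--         return is_valid_pt1(min_occ - 1, max_occ - 1, glyph, password[1:])
--     else:
--         return is_valid_pt1(min_occ, max_occ, glyph, password[1:])
-- ===== SOURCE B (Python) =====
-- def is_valid_pt1(min_occ, max_occ, glyph, password):
--     count = 0
--     for ch in password: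
--         if ch == glyph:
--             count += 1
--     return min_occ <= count <= max_occ
-- ===== Notes on version B (the rewrite author's own statement) =====
-- stated objective: faster
-- what changed: Replaces A's character-by-character recursion that threads decremented min/max bounds (copying password[1:] at each step) with one flat counting loop and a single final range comparison, removing the quadratic slicing.
import Mathlib
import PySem

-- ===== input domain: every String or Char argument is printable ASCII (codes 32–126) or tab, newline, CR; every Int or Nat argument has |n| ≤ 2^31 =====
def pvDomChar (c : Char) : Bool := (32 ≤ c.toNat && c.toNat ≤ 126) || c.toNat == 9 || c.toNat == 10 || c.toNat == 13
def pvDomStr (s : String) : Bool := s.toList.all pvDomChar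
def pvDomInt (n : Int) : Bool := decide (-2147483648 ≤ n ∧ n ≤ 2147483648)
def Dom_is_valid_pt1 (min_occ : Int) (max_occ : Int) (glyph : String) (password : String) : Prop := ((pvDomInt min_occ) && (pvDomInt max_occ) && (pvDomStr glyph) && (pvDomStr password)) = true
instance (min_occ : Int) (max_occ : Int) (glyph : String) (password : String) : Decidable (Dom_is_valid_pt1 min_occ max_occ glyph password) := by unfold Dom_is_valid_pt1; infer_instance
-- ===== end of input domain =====

-- B replaces A's bound-decrementing recursion with one counting loop and a final range test (simpler).


-- ===== PORT A =====
-- A recurses on the password (password[1:]), decrementing both bounds on a glyph match;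
-- ported as structural recursion over the character list.
def isValidAuxA (min_occ : Int) (max_occ : Int) (glyph : String) : List Char → Bool
  | [] => decide (min_occ ≤ 0 ∧ 0 ≤ max_occ)
  | c :: rest =>
    if max_occ < 0 then false
    else if String.ofList [c] == glyph then isValidAuxA (min_occ - 1) (max_occ - 1) glyph rest
    else isValidAuxA min_occ max_occ glyph rest

def is_valid_pt1 (min_occ : Int) (max_occ : Int) (glyph : String) (password : String) : Bool :=
  isValidAuxA min_occ max_occ glyph password.toList

-- ===== PORT B =====
-- B: count = 0; for ch in password: if ch == glyph: count += 1; return min_occ <= count <= max_occ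
def is_valid_pt1_alt (min_occ : Int) (max_occ : Int) (glyph : String) (password : String) : Bool :=
  let count : Int :=
    password.toList.foldl (fun cnt ch => if String.ofList [ch] == glyph then cnt + 1 else cnt) 0
  decide (min_occ ≤ count ∧ count ≤ max_occ)

-- ===== PRECONDITION & SPEC =====
def Spec_is_valid_pt1 (min_occ : Int) (max_occ : Int) (glyph : String) (password : String) (out : Bool) : Prop := out = is_valid_pt1_alt min_occ max_occ glyph password
instance (min_occ : Int) (max_occ : Int) (glyph : String) (password : String) (out : Bool) : Decidable (Spec_is_valid_pt1 min_occ max_occ glyph password out) := by unfold Spec_is_valid_pt1; infer_instance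

-- ===== CLAIM (what is proved, stated in full; the proofs are below) =====
def Claim_equal_is_valid_pt1 : Prop := ∀ (min_occ : Int) (max_occ : Int) (glyph : String) (password : String), Dom_is_valid_pt1 min_occ max_occ glyph password → Spec_is_valid_pt1 min_occ max_occ glyph password (is_valid_pt1 min_occ max_occ glyph password)

-- ===== LEMMAS AND PROOFS =====
-- the glyph count of a character list, as an Int
def glyphCount (glyph : String) (l : List Char) : Int :=
  ((l.countP (fun c => String.ofList [c] == glyph)) : Int)

theorem glyphCount_nil (glyph : String) : glyphCount glyph [] = 0 := rfl

theorem glyphCount_cons (glyph : String) (c : Char) (rest : List Char) :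
    glyphCount glyph (c :: rest) =
      (if String.ofList [c] == glyph then 1 else 0) + glyphCount glyph rest := by
  simp only [glyphCount, List.countP_cons]
  split <;> push_cast <;> omega

theorem glyphCount_nonneg (glyph : String) (l : List Char) : 0 ≤ glyphCount glyph l := by
  simp [glyphCount]

-- A's recursion computes the range test on the glyph count
theorem auxA_eq (glyph : String) (l : List Char) :
    ∀ (mn mx : Int), isValidAuxA mn mx glyph l =
      decide (mn ≤ glyphCount glyph l ∧ glyphCount glyph l ≤ mx) := by
  induction l with
  | nil => intro mn mx; simp [isValidAuxA, glyphCount_nil]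
  | cons c rest ih =>
    intro mn mx
    have hnn := glyphCount_nonneg glyph rest
    by_cases hneg : mx < 0
    · have : ¬ (mn ≤ glyphCount glyph (c :: rest) ∧ glyphCount glyph (c :: rest) ≤ mx) := by
        rw [glyphCount_cons]
        split <;> omega
      simp [isValidAuxA, hneg, this]
    · by_cases hm : String.ofList [c] == glyph
      · rw [isValidAuxA, if_neg hneg, if_pos hm, ih, glyphCount_cons, if_pos hm]
        by_cases h1 : mn - 1 ≤ glyphCount glyph rest ∧ glyphCount glyph rest ≤ mx - 1
        · simp only [decide_eq_true h1]
          have : mn ≤ 1 + glyphCount glyph rest ∧ 1 + glyphCount glyph rest ≤ mx := by omega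
          simp [this]
        · simp only [decide_eq_false h1]
          have : ¬ (mn ≤ 1 + glyphCount glyph rest ∧ 1 + glyphCount glyph rest ≤ mx) := by omega
          simp [this]
      · rw [isValidAuxA, if_neg hneg, if_neg hm, ih, glyphCount_cons, if_neg hm]
        norm_num

-- B's foldl computes the glyph count (shifted by the accumulator)
theorem foldl_count (glyph : String) (l : List Char) :
    ∀ (acc : Int),
      l.foldl (fun cnt ch => if String.ofList [ch] == glyph then cnt + 1 else cnt) acc =
        acc + glyphCount glyph l := by
  induction l with
  | nil => intro acc; simp [glyphCount_nil]
  | cons c rest ih =>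
    intro acc
    rw [List.foldl_cons, ih, glyphCount_cons]
    split <;> omega

-- ===== VERDICT (by name: the statement is the Claim_ definition above) =====
theorem is_valid_pt1_spec : Claim_equal_is_valid_pt1 := by
  intro mn mx glyph password _
  unfold Spec_is_valid_pt1 is_valid_pt1 is_valid_pt1_alt
  rw [auxA_eq, foldl_count]
  norm_num
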